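-- pv_equiv track=rewrite | github.com/bestsemper/plan-your-future | scripts/fetch_course_details.py | keep_subjects_before_start
-- ===== SOURCE A (Python) =====
-- def subject_from_course_code(course_code: str) -> str:
--     return " ".join(str(course_code or "").split()).split(" ")[0].upper()
--
-- def keep_subjects_before_start(
--     existing_courses: dict[str, dict],
--     subjects: list[tuple[str, str]],
--     start_index: int,
-- ) -> dict[str, dict]:
--     subject_order = {code.upper(): i for i, (code, _name) in enumerate(subjects)}
--
--     kept: dict[str, dict] = {}
--     for key, course in existing_courses.items():
--         subject_code = subject_from_course_code(course.get("course_code", ""))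
--         idx = subject_order.get(subject_code)
--
--         # Keep unknown subjects and everything before start subject.
--         if idx is None or idx < start_index:
--             kept[key] = course
--
--     return kept
-- ===== SOURCE B (Python) =====
-- def subject_from_course_code(course_code: str) -> str:
--     return " ".join(str(course_code or "").split()).split(" ")[0].upper()
--
-- def keep_subjects_before_start(
--     existing_courses: dict[str, dict],
--     subjects: list[tuple[str, str]],
--     start_index: int,
-- ) -> dict[str, dict]:
--     # Annotate each course with its subject code once, then walk the subject
--     # list, deleting (one filtering pass per subject) the courses of every
--     # subject whose index is at or after start_index. A course survives iff
--     # its subject never occurs at an index >= start_index, i.e. its last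
--     # index is before start_index or it is unknown -- exactly A's condition.
--     remaining = [
--         (key, course, subject_from_course_code(course.get("course_code", "")))
--         for key, course in existing_courses.items()
--     ]
--     for i, (code, _name) in enumerate(subjects):
--         if i >= start_index:
--             c = code.upper()
--             remaining = [t for t in remaining if t[2] != c]
--     return {key: course for key, course, _ in remaining}
-- ===== Notes on version B (the rewrite author's own statement) =====
-- stated objective: alternative
-- what changed: B builds no subject->index lookup at all: it annotates each course with its subject code once, then iterates over the subjects themselves, deleting with one filtering pass per at-or-after-start subject all courses of that subject; A instead makes a single pass over the courses testing each against a code->index dict.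
import Mathlib
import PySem

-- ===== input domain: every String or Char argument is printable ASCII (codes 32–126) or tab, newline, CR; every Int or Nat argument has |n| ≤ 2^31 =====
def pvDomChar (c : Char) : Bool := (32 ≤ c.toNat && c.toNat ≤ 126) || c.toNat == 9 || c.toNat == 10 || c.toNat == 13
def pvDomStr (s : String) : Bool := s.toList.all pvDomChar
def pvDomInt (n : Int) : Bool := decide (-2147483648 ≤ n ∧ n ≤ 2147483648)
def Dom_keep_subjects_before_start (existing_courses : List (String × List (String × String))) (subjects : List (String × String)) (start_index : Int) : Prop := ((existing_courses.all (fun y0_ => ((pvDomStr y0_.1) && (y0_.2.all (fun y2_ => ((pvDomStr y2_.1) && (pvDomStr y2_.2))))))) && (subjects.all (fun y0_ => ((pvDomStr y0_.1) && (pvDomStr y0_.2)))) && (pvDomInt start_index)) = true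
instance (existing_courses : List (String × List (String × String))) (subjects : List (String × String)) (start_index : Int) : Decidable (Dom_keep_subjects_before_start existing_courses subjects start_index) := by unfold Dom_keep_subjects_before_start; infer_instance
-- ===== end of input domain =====

-- B drops A's code→index dict entirely: it annotates each course with its subject code once,
-- then makes one deletion (filter) pass per at-or-after-start subject (objective: alternative).

-- ===== PORT A =====

-- shared module helper: " ".join(str(course_code or "").split()).split(" ")[0].upper()
-- the .split(" ") of a string by a nonempty separator is never empty, so the [0] never raises;
-- it is ported as headD "" (exact: the [] branch is unreachable).
def subject_from_course_code (course_code : String) : String :=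
  PySem.Str.upper (((PySem.Str.split? (PySem.Str.join " " (PySem.Str.split₀ course_code)) " ").getD []).headD "")

-- subject_order = {code.upper(): i for i, (code, _name) in enumerate(subjects)}
def subjOrder (subjects : List (String × String)) : PySem.Dict String Int :=
  (PySem.List.enumerate subjects 0).foldl
    (fun d p => d.insert (PySem.Str.upper p.2.1) p.1) PySem.Dict.empty

def keep_subjects_before_start (existing_courses : List (String × List (String × String))) (subjects : List (String × String)) (start_index : Int) : List (String × List (String × String)) :=
  (existing_courses.foldl
    (fun kept kc =>
      let subject_code := subject_from_course_code (PySem.Dict.getD (PySem.Dict.mk kc.2) "course_code" "")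
      match (subjOrder subjects).get? subject_code with
      | none => kept.insert kc.1 kc.2
      | some idx => if idx < start_index then kept.insert kc.1 kc.2 else kept)
    PySem.Dict.empty).items

-- ===== PORT B =====

def keep_subjects_before_start_alt (existing_courses : List (String × List (String × String))) (subjects : List (String × String)) (start_index : Int) : List (String × List (String × String)) :=
  -- remaining = [(key, course, subject_from_course_code(course.get("course_code",""))) for key, course in existing_courses.items()]
  let remaining := existing_courses.map
    (fun kc => (kc.1, kc.2, subject_from_course_code (PySem.Dict.getD (PySem.Dict.mk kc.2) "course_code" "")))
  -- for i, (code, _name) in enumerate(subjects): if i >= start_index: remaining = [t for t in remaining if t[2] != code.upper()]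
  let remaining := (PySem.List.enumerate subjects 0).foldl
    (fun rem p => if start_index ≤ p.1 then rem.filter (fun t => t.2.2 != PySem.Str.upper p.2.1) else rem)
    remaining
  -- return {key: course for key, course, _ in remaining}
  (remaining.foldl (fun d t => d.insert t.1 t.2.1) PySem.Dict.empty).items

-- ===== PRECONDITION & SPEC =====
def Spec_keep_subjects_before_start (existing_courses : List (String × List (String × String))) (subjects : List (String × String)) (start_index : Int) (out : List (String × List (String × String))) : Prop := out = keep_subjects_before_start_alt existing_courses subjects start_index
instance (existing_courses : List (String × List (String × String))) (subjects : List (String × String)) (start_index : Int) (out : List (String × List (String × String))) : Decidable (Spec_keep_subjects_before_start existing_courses subjects start_index out) := by unfold Spec_keep_subjects_before_start; infer_instance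

-- ===== CLAIM (what is proved, stated in full; the proofs are below) =====
def Claim_equal_keep_subjects_before_start : Prop := ∀ (existing_courses : List (String × List (String × String))) (subjects : List (String × String)) (start_index : Int), Dom_keep_subjects_before_start existing_courses subjects start_index → Spec_keep_subjects_before_start existing_courses subjects start_index (keep_subjects_before_start existing_courses subjects start_index)

-- ===== LEMMAS AND PROOFS =====

-- the Boolean "keep" test both sides are reduced to: the course's subject code never
-- occurs (uppercased) at a subject index ≥ start_index
def keepB (subjects : List (String × String)) (start_index : Int) (c : String) : Bool :=
  (PySem.List.enumerate subjects 0).all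
    (fun p => !(decide (start_index ≤ p.1) && c == PySem.Str.upper p.2.1))

-- B's staged deletion passes amount to one filter by keepB (generalized over any index list)
lemma stage_filters (start_index : Int)
    (L : List (Int × String × String)) :
    ∀ (l₀ : List (String × List (String × String) × String)),
    L.foldl (fun rem p => if start_index ≤ p.1 then rem.filter (fun t => t.2.2 != PySem.Str.upper p.2.1) else rem) l₀
      = l₀.filter (fun t => L.all (fun p => !(decide (start_index ≤ p.1) && t.2.2 == PySem.Str.upper p.2.1))) := by
  induction L with
  | nil => intro l₀; simp
  | cons p L ih =>
    intro l₀
    by_cases h : start_index ≤ p.1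
    · simp only [List.foldl_cons, if_pos h, ih, List.filter_filter, List.all_cons]
      apply List.filter_congr
      intro t _
      simp [h, bne, Bool.and_comm]
    · simp only [List.foldl_cons, if_neg h, ih, List.all_cons]
      apply List.filter_congr
      intro t _
      simp [h]
  
-- A's dict lookup condition, over any index list whose indices are strictly increasing,
-- is the same "never at index ≥ start" test (last occurrence ≥ start ↔ some occurrence ≥ start)
lemma foldl_insert_get (start_index : Int) (c : String)
    (L : List (Int × String × String)) (hpw : L.Pairwise (fun p q => p.1 < q.1)) :
    (match (L.foldl (fun d p => d.insert (PySem.Str.upper p.2.1) p.1) PySem.Dict.empty).get? c with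
     | none => True
     | some i => i < start_index) ↔
    (L.all (fun p => !(decide (start_index ≤ p.1) && c == PySem.Str.upper p.2.1)) = true) := by
  induction L using List.reverseRecOn with
  | nil => simp [PySem.Dict.get?_empty]
  | append_singleton L x ih =>
    have hmono : ∀ p ∈ L, p.1 < x.1 := by
      have h := List.pairwise_append.mp hpw
      intro p hp; exact h.2.2 p hp x (by simp)
    have hpwL : L.Pairwise (fun p q => p.1 < q.1) := (List.pairwise_append.mp hpw).1
    rw [List.foldl_append]
    simp only [List.foldl_cons, List.foldl_nil, List.all_append, List.all_cons, List.all_nil,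
               Bool.and_true, Bool.and_eq_true]
    rw [PySem.Dict.get?_insert]
    by_cases hc : c = PySem.Str.upper x.2.1
    · rw [if_pos hc]
      constructor
      · intro hlt
        have hlt' : x.1 < start_index := hlt
        constructor
        · rw [List.all_eq_true]
          intro p hp
          have : ¬ start_index ≤ p.1 := by have := hmono p hp; omega
          simp [this]
        · simp [hc]; omega
      · intro h
        have := h.2
        simp [hc] at this
        show x.1 < start_index
        omega
    · rw [if_neg hc]
      rw [ih hpwL]
      have : (c == PySem.Str.upper x.2.1) = false := by
        simpa using hc
      simp [this]

-- A's per-course step is an "if keepB then insert" step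
lemma stepA_eq (subjects : List (String × String)) (start_index : Int) :
    (fun (kept : PySem.Dict String (List (String × String))) (kc : String × List (String × String)) =>
      let subject_code := subject_from_course_code (PySem.Dict.getD (PySem.Dict.mk kc.2) "course_code" "")
      match (subjOrder subjects).get? subject_code with
      | none => kept.insert kc.1 kc.2
      | some idx => if idx < start_index then kept.insert kc.1 kc.2 else kept) =
    (fun kept kc =>
      if keepB subjects start_index (subject_from_course_code (PySem.Dict.getD (PySem.Dict.mk kc.2) "course_code" "")) then kept.insert kc.1 kc.2 else kept) := by
  funext kept kc
  show (match (subjOrder subjects).get? (subject_from_course_code (PySem.Dict.getD (PySem.Dict.mk kc.2) "course_code" "")) with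
     | none => kept.insert kc.1 kc.2
     | some idx => if idx < start_index then kept.insert kc.1 kc.2 else kept) = _
  generalize subject_from_course_code (PySem.Dict.getD (PySem.Dict.mk kc.2) "course_code" "") = c
  have h := foldl_insert_get start_index c (PySem.List.enumerate subjects 0)
    (PySem.List.pairwise_lt_enumerate subjects 0)
  rcases hg : (subjOrder subjects).get? c with _ | i <;>
    rw [subjOrder] at hg <;> rw [hg] at h
  · have hk : keepB subjects start_index c = true := h.mp trivial
    simp [hk]
  · by_cases hi : i < start_index
    · have hk : keepB subjects start_index c = true := h.mp hi
      simp [hk, hi]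
    · have hk : keepB subjects start_index c = false := by
        rcases hb : keepB subjects start_index c
        · rfl
        · exact absurd (h.mpr hb) hi
      simp [hk, hi]

-- ===== VERDICT (by name: the statement is the Claim_ definition above) =====
theorem keep_subjects_before_start_spec : Claim_equal_keep_subjects_before_start := by
  intro existing_courses subjects start_index _
  unfold Spec_keep_subjects_before_start keep_subjects_before_start keep_subjects_before_start_alt
  congr 1
  rw [stepA_eq subjects start_index,
      PySem.List.foldl_if_eq_foldl_filter,
      stage_filters, List.filter_map, List.foldl_map]
  rfl
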